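-- pv_equiv track=rewrite | github.com/ui3TD/baberu | src/baberu/subtitling/sub_correction.py | find_mistimed_groups
-- ===== SOURCE A (Python) =====
-- def find_mistimed_groups(mistimed_lines: set[int],
--                          group_min_lines: int) -> list[list[int]]:
--     """Identifies consecutive groups of mistimed subtitle indices.
--
--     Args:
--         mistimed_lines (set[int]): A set of indices for mistimed lines.
--         group_min_lines (int): The minimum number of lines to constitute a group.
--
--     Returns:
--         list[list[int]]: A list of groups, where each group is a list of consecutive indices.
--     """
--     groups = []
--     current_group = []
--     sorted_indices = sorted(mistimed_lines)
--     for idx in sorted_indices: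
--         if not current_group or idx == current_group[-1] + 1:
--             current_group.append(idx)
--         else:
--             if len(current_group) >= group_min_lines:
--                 groups.append(current_group)
--             current_group = [idx]
--
--     if current_group and len(current_group) >= group_min_lines:
--         groups.append(current_group)
--     return groups
-- ===== SOURCE B (Python) =====
-- def find_mistimed_groups(mistimed_lines: set[int],
--                          group_min_lines: int) -> list[list[int]]:
--     """Membership-driven run expansion (the classic hash-set 'longest
--     consecutive sequence' technique): a run starts at x iff x-1 is not in
--     the set; from each sorted start, extend forward by set lookups."""
--     s = set(mistimed_lines)
--     groups = []
--     for start in sorted(x for x in s if x - 1 not in s):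
--         run = []
--         cur = start
--         while cur in s:
--             run.append(cur)
--             cur += 1
--         if len(run) >= group_min_lines:
--             groups.append(run)
--     return groups
-- ===== Notes on version B (the rewrite author's own statement) =====
-- stated objective: alternative
-- what changed: B replaces A's sorted-list linear scan with a current-group accumulator by membership-driven run expansion: it finds run starts as the set elements x with x-1 not in the set, sorts only the starts, and expands each run forward by hash-set lookups, filtering by size as it goes.
import Mathlib
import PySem

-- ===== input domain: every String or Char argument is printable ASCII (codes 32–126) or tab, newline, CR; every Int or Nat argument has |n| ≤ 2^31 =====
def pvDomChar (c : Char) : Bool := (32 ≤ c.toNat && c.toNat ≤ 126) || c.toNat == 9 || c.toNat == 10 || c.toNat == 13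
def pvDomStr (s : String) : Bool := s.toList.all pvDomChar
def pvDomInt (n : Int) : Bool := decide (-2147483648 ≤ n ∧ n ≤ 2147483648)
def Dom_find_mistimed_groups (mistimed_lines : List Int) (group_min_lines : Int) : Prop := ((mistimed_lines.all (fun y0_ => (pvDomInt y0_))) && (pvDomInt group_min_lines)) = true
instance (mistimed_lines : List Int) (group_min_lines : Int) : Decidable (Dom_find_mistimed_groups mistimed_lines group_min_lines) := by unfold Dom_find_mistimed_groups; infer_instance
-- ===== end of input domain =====

-- B finds run starts by set membership (x is a start iff x-1 not in the set), sorts only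
-- the starts, and expands each run forward by lookups, instead of A's scan of the whole
-- sorted list with a current-group accumulator; same cost class, no speed claim.

-- ===== PORT A =====
def find_mistimed_groups (mistimed_lines : List Int) (group_min_lines : Int) : List (List Int) :=
  let sorted_indices := PySem.List.sorted mistimed_lines (fun x => x)
  let st := sorted_indices.foldl
    (fun (st : List (List Int) × List Int) idx =>
      -- if not current_group or idx == current_group[-1] + 1
      if st.2 = [] ∨ (PySem.List.pyGet? st.2 (-1)).map (· + 1) = some idx then
        (st.1, st.2 ++ [idx])
      else
        ((if (st.2.length : Int) ≥ group_min_lines then st.1 ++ [st.2] else st.1), [idx]))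
    ([], [])
  if st.2 ≠ [] ∧ (st.2.length : Int) ≥ group_min_lines then st.1 ++ [st.2] else st.1

-- ===== PORT B =====
-- 'while cur in s: run.append(cur); cur += 1' — ported with fuel |s|: the run's members are
-- distinct elements of s, so the while loop runs at most |s| times and the fuel never truncates
def pvExpand (mem : Int → Bool) : Nat → Int → List Int
  | 0, _ => []
  | f + 1, cur => if mem cur then cur :: pvExpand mem f (cur + 1) else []

def find_mistimed_groups_alt (mistimed_lines : List Int) (group_min_lines : Int) : List (List Int) :=
  let s : PySem.Set Int := PySem.Set.ofList mistimed_lines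
  -- the filtered set comprehension feeds sorted(), so the set's iteration order cannot matter
  let starts := PySem.List.sorted (s.filter (fun x => !(PySem.Set.contains s (x - 1)))) (fun x => x)
  starts.foldl (fun groups start =>
    let run := pvExpand (fun z => PySem.Set.contains s z) s.length start
    if (run.length : Int) ≥ group_min_lines then groups ++ [run] else groups) []

-- ===== PRECONDITION & SPEC =====
-- Pre_ excludes lists with duplicate elements: the Python parameter is a set[int], modelled
-- here as its list of distinct elements, so a duplicate-bearing list represents no set at all
-- and neither program's behaviour on it is specified.
def Pre_find_mistimed_groups (mistimed_lines : List Int) (group_min_lines : Int) : Prop :=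
  mistimed_lines.Nodup
instance (mistimed_lines : List Int) (group_min_lines : Int) : Decidable (Pre_find_mistimed_groups mistimed_lines group_min_lines) := by unfold Pre_find_mistimed_groups; infer_instance
def pvWitness_find_mistimed_groups : List Int × Int := ([5, 1, 2, 3, 9, 10], 2)

def Spec_find_mistimed_groups (mistimed_lines : List Int) (group_min_lines : Int) (out : List (List Int)) : Prop := out = find_mistimed_groups_alt mistimed_lines group_min_lines
instance (mistimed_lines : List Int) (group_min_lines : Int) (out : List (List Int)) : Decidable (Spec_find_mistimed_groups mistimed_lines group_min_lines out) := by unfold Spec_find_mistimed_groups; infer_instance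

-- ===== CLAIM (what is proved, stated in full; the proofs are below) =====
def Claim_equal_find_mistimed_groups : Prop := ∀ (mistimed_lines : List Int) (group_min_lines : Int), Dom_find_mistimed_groups mistimed_lines group_min_lines → Pre_find_mistimed_groups mistimed_lines group_min_lines → Spec_find_mistimed_groups mistimed_lines group_min_lines (find_mistimed_groups mistimed_lines group_min_lines)

-- ===== LEMMAS AND PROOFS =====

-- the canonical grouping of a sorted list into maximal consecutive runs, built by foldr
def pvStepB (idx : Int) (runs : List (List Int)) : List (List Int) :=
  match runs with
  | r :: rest => if r.head? = some (idx + 1) then (idx :: r) :: rest else [idx] :: r :: rest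
  | [] => [[idx]]

def pvR (xs : List Int) : List (List Int) := xs.foldr pvStepB []

-- A's fold step and finisher
def pvStepA (m : Int) (st : List (List Int) × List Int) (idx : Int) : List (List Int) × List Int :=
  if st.2 = [] ∨ (PySem.List.pyGet? st.2 (-1)).map (· + 1) = some idx then
    (st.1, st.2 ++ [idx])
  else
    ((if (st.2.length : Int) ≥ m then st.1 ++ [st.2] else st.1), [idx])

def pvFinishA (m : Int) (st : List (List Int) × List Int) : List (List Int) :=
  if st.2 ≠ [] ∧ (st.2.length : Int) ≥ m then st.1 ++ [st.2] else st.1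

-- attaching a run-in-progress (ending at `last`) in front of already-grouped runs
def pvAttach (cur : List Int) (last : Int) (rs : List (List Int)) : List (List Int) :=
  match rs with
  | (y :: ys) :: rest => if y = last + 1 then (cur ++ y :: ys) :: rest else cur :: (y :: ys) :: rest
  | _ => cur :: rs

lemma pvA_eq (ml : List Int) (m : Int) :
    find_mistimed_groups ml m =
      pvFinishA m ((PySem.List.sorted ml (fun x => x)).foldl (pvStepA m) ([], [])) := rfl

lemma pvR_ne_nil : ∀ (xs : List Int), ∀ r ∈ pvR xs, r ≠ [] := by
  intro xs
  induction xs with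
  | nil => simp [pvR]
  | cons x xs ih =>
    have hR : pvR (x :: xs) = pvStepB x (pvR xs) := rfl
    rw [hR]
    cases h : pvR xs with
    | nil => simp [pvStepB]
    | cons r0 rest =>
      intro r hr
      rcases Decidable.em (r0.head? = some (x + 1)) with hcond | hcond <;>
        simp only [pvStepB, hcond, if_true, if_false] at hr
      · rcases List.mem_cons.1 hr with hr | hr
        · subst hr; simp
        · exact ih r (by rw [h]; exact List.mem_cons_of_mem _ hr)
      · rcases List.mem_cons.1 hr with hr | hr
        · subst hr; simp
        · exact ih r (by rw [h]; exact hr)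

lemma pvStepB_attach (x : Int) (rs : List (List Int)) (h : ∀ r ∈ rs, r ≠ []) :
    pvStepB x rs = pvAttach [x] x rs := by
  cases rs with
  | nil => rfl
  | cons r rest =>
    cases r with
    | nil => exact absurd rfl (h [] (by simp))
    | cons y ys =>
      unfold pvStepB pvAttach
      by_cases hy : y = x + 1 <;> simp [hy]

lemma pvAttach_step_cont (cur : List Int) (last x : Int) (rs : List (List Int))
    (h : ∀ r ∈ rs, r ≠ []) (hx : x = last + 1) :
    pvAttach cur last (pvStepB x rs) = pvAttach (cur ++ [x]) x rs := by
  subst hx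
  cases rs with
  | nil => simp [pvStepB, pvAttach]
  | cons r rest =>
    cases r with
    | nil => exact absurd rfl (h [] (by simp))
    | cons y ys =>
      by_cases hy : y = last + 1 + 1 <;> simp [pvStepB, pvAttach, hy]

lemma pvAttach_step_break (cur : List Int) (last x : Int) (rs : List (List Int))
    (h : ∀ r ∈ rs, r ≠ []) (hx : x ≠ last + 1) :
    pvAttach cur last (pvStepB x rs) = cur :: pvStepB x rs := by
  cases rs with
  | nil => unfold pvStepB pvAttach; simp [hx]
  | cons r rest =>
    cases r with
    | nil => exact absurd rfl (h [] (by simp))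
    | cons y ys =>
      by_cases hy : y = x + 1 <;> simp [pvStepB, pvAttach, hy, hx]

lemma pvLoopA (m : Int) : ∀ (xs : List Int) (groups : List (List Int)) (cur : List Int) (last : Int),
    cur ≠ [] → cur.getLast? = some last →
    pvFinishA m (xs.foldl (pvStepA m) (groups, cur)) =
      groups ++ (pvAttach cur last (pvR xs)).filter (fun r => decide ((r.length : Int) ≥ m)) := by
  intro xs
  induction xs with
  | nil =>
    intro groups cur last hc _
    unfold pvFinishA pvR pvAttach
    simp only [List.foldl, List.foldr]
    by_cases hlen : (cur.length : Int) ≥ m <;> simp [hc, hlen]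
  | cons x xs ih =>
    intro groups cur last hc hl
    have hget : (PySem.List.pyGet? cur (-1)).map (· + 1) = some (last + 1) := by
      rw [PySem.List.pyGet?_neg_one, hl]; rfl
    have hR : pvR (x :: xs) = pvStepB x (pvR xs) := rfl
    simp only [List.foldl]
    by_cases hx : x = last + 1
    · have hstep : pvStepA m (groups, cur) x = (groups, cur ++ [x]) := by
        unfold pvStepA; simp [hget, hx]
      rw [hstep, ih groups (cur ++ [x]) x (by simp) (by simp)]
      rw [hR, pvAttach_step_cont cur last x (pvR xs) (pvR_ne_nil xs) hx]
    · have hstep : pvStepA m (groups, cur) x =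
          ((if (cur.length : Int) ≥ m then groups ++ [cur] else groups), [x]) := by
        have hx' : ¬ last + 1 = x := fun hh => hx hh.symm
        unfold pvStepA
        simp [hc, hget, hx']
      rw [hstep, ih _ [x] x (by simp) (by simp)]
      rw [hR, pvAttach_step_break cur last x (pvR xs) (pvR_ne_nil xs) hx,
          pvStepB_attach x (pvR xs) (pvR_ne_nil xs)]
      by_cases hlen : (cur.length : Int) ≥ m <;> simp [hlen, List.filter]

-- A equals the size-filtered canonical runs of its sorted input
lemma pvA_char (ml : List Int) (m : Int) :
    find_mistimed_groups ml m =
      (pvR (PySem.List.sorted ml (fun x => x))).filter (fun r => decide ((r.length : Int) ≥ m)) := by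
  rw [pvA_eq]
  cases hs : PySem.List.sorted ml (fun x => x) with
  | nil => rfl
  | cons x xs =>
    have hfirst : pvStepA m ([], []) x = ([], [x]) := by unfold pvStepA; simp
    simp only [List.foldl, hfirst]
    rw [pvLoopA m xs [] [x] x (by simp) (by simp)]
    rw [show pvR (x :: xs) = pvStepB x (pvR xs) from rfl,
        pvStepB_attach x (pvR xs) (pvR_ne_nil xs)]
    simp

-- B-side facts about pvExpand
lemma pvExpand_nil (mem : Int → Bool) (f : Nat) (h : Int) (hm : mem h = false) :
    pvExpand mem f h = [] := by
  cases f <;> simp [pvExpand, hm]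

lemma pvExpand_congr : ∀ (f : Nat) (h : Int) (mem mem' : Int → Bool),
    (∀ z, h ≤ z → mem z = mem' z) → pvExpand mem f h = pvExpand mem' f h := by
  intro f
  induction f with
  | zero => intro h mem mem' _; rfl
  | succ f ih =>
    intro h mem mem' hag
    simp only [pvExpand, hag h le_rfl]
    by_cases hm : mem' h = true
    · simp only [hm, if_true]
      rw [ih (h + 1) mem mem' (fun z hz => hag z (by omega))]
    · simp [hm]

lemma pvExpand_stable : ∀ (k : Nat) (mem : Int → Bool) (h : Int) (f f' : Nat),
    mem (h + k) = false → k ≤ f → k ≤ f' → pvExpand mem f h = pvExpand mem f' h := by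
  intro k
  induction k with
  | zero =>
    intro mem h f f' hm _ _
    have hm' : mem h = false := by simpa using hm
    rw [pvExpand_nil mem f h hm', pvExpand_nil mem f' h hm']
  | succ k ih =>
    intro mem h f f' hm hf hf'
    by_cases hmh : mem h = true
    · obtain ⟨f₁, rfl⟩ : ∃ f₁, f = f₁ + 1 := ⟨f - 1, by omega⟩
      obtain ⟨f₂, rfl⟩ : ∃ f₂, f' = f₂ + 1 := ⟨f' - 1, by omega⟩
      simp only [pvExpand, hmh, if_true]
      rw [ih mem (h + 1) f₁ f₂
        (by rw [show h + 1 + (k : Int) = h + ((k : Int) + 1) by ring]; exact_mod_cast hm)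
        (by omega) (by omega)]
    · have hmh' : mem h = false := by simpa using hmh
      rw [pvExpand_nil mem f h hmh', pvExpand_nil mem f' h hmh']

-- pigeonhole: from any h, a finite nodup list misses some h + k with k ≤ length
lemma pvExists_gap (L : List Int) (h : Int) :
    ∃ k : Nat, k ≤ L.length ∧ (h + k) ∉ L := by
  by_contra hc
  push_neg at hc
  have hsub : ((List.range (L.length + 1)).map (fun k : Nat => h + k)) ⊆ L := by
    intro z hz
    simp only [List.mem_map, List.mem_range] at hz
    obtain ⟨k, hk, rfl⟩ := hz
    exact hc k (by omega)
  have hndm : ((List.range (L.length + 1)).map (fun k : Nat => h + k)).Nodup := by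
    refine (List.nodup_range).map ?_
    intro a b hab
    simp only [add_right_inj, Nat.cast_inj] at hab
    exact hab
  have hle := (hndm.subperm hsub).length_le
  simp only [List.length_map, List.length_range] at hle
  omega

lemma pvR_head (a : Int) (l : List Int) : ∃ t rest, pvR (a :: l) = (a :: t) :: rest := by
  show ∃ t rest, pvStepB a (pvR l) = _
  cases hl : pvR l with
  | nil => exact ⟨[], [], rfl⟩
  | cons r rest =>
    by_cases hc : r.head? = some (a + 1)
    · exact ⟨r, rest, by simp [pvStepB, hc]⟩
    · exact ⟨[], r :: rest, by simp [pvStepB, hc]⟩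

-- MAIN: on a strictly increasing list, the canonical runs are exactly the membership-expanded
-- runs grown from the starts (elements whose predecessor is absent)
lemma pvR_runs : ∀ (L : List Int), L.Pairwise (· < ·) → ∀ (mem : Int → Bool) (F : Nat),
    (∀ z, mem z = true ↔ z ∈ L) → L.length ≤ F →
    pvR L = (L.filter (fun x => !mem (x - 1))).map (pvExpand mem F) := by
  intro L
  induction L with
  | nil => intro _ mem F _ _; rfl
  | cons x xs ih =>
    intro hpw mem F hmem hF
    have hlt : ∀ z ∈ xs, x < z := (List.pairwise_cons.mp hpw).1
    have hpw' : xs.Pairwise (· < ·) := (List.pairwise_cons.mp hpw).2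
    have hmem' : ∀ z : Int, (decide (z ∈ xs)) = true ↔ z ∈ xs := by intro z; simp
    have hagree : ∀ z, x < z → mem z = decide (z ∈ xs) := by
      intro z hz
      by_cases h1 : z ∈ xs
      · simp [h1, (hmem z).2 (by simp [h1])]
      · have hzn : z ∉ (x :: xs) := by
          simp only [List.mem_cons, not_or]
          exact ⟨by omega, h1⟩
        have : mem z = false := by
          cases hmz : mem z
          · rfl
          · exact absurd ((hmem z).1 hmz) hzn
        simp [this, h1]
    have hpx : (!mem (x - 1)) = true := by
      have hno : (x - 1) ∉ (x :: xs) := by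
        simp only [List.mem_cons, not_or]
        exact ⟨by omega, fun hin => by have := hlt _ hin; omega⟩
      cases hmz : mem (x - 1)
      · simp
      · exact absurd ((hmem _).1 hmz) hno
    have hmx : mem x = true := (hmem x).2 (by simp)
    obtain ⟨F₁, rfl⟩ : ∃ F₁, F = F₁ + 1 :=
      ⟨F - 1, by simp only [List.length_cons] at hF; omega⟩
    have hxslen : xs.length ≤ F₁ + 1 := by simp only [List.length_cons] at hF; omega
    have ihx := ih hpw' (fun z => decide (z ∈ xs)) (F₁ + 1) hmem' hxslen
    have hF1 : xs.length ≤ F₁ := by simp only [List.length_cons] at hF; omega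
    by_cases hx1 : (x + 1) ∈ xs
    · -- the head run continues into xs
      cases xs with
      | nil => simp at hx1
      | cons y ys =>
        have hy : y = x + 1 := by
          rcases List.mem_cons.mp hx1 with h | h
          · omega
          · have h1 := hlt y (by simp)
            have h2 := (List.pairwise_cons.mp hpw').1 _ h
            omega
        subst hy
        obtain ⟨t, rest, hhd⟩ := pvR_head (x + 1) ys
        have hLHS : pvR (x :: (x + 1) :: ys) = (x :: (x + 1) :: t) :: rest := by
          show pvStepB x (pvR ((x + 1) :: ys)) = _
          rw [hhd]
          simp [pvStepB]
        -- unpack the induction hypothesis for the tail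
        have hpy : (!(decide ((x + 1 - 1) ∈ ((x + 1) :: ys)))) = true := by
          have hxnot : x ∉ (x + 1) :: ys := by
            simp only [List.mem_cons, not_or]
            exact ⟨by omega, fun hin => by have := hlt x (List.mem_cons_of_mem _ hin); omega⟩
          simpa using hxnot
        have hysgt : ∀ z ∈ ys, x + 1 < z := (List.pairwise_cons.mp hpw').1
        have hihx : pvR ((x + 1) :: ys) =
            pvExpand (fun z => decide (z ∈ (x + 1) :: ys)) (F₁ + 1) (x + 1) ::
              (ys.filter (fun z => !(decide ((z - 1) ∈ ((x + 1) :: ys))))).map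
                (pvExpand (fun z => decide (z ∈ (x + 1) :: ys)) (F₁ + 1)) := by
          rw [ihx]
          simp only [List.filter_cons, hpy, if_true, List.map]
        have heq1 : (x + 1) :: t = pvExpand (fun z => decide (z ∈ (x + 1) :: ys)) (F₁ + 1) (x + 1) := by
          have := hhd.symm.trans hihx
          exact (List.cons.injEq _ _ _ _ ▸ this).1
        have heq2 : rest = (ys.filter (fun z => !(decide ((z - 1) ∈ ((x + 1) :: ys))))).map
            (pvExpand (fun z => decide (z ∈ (x + 1) :: ys)) (F₁ + 1)) := by
          have := hhd.symm.trans hihx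
          exact (List.cons.injEq _ _ _ _ ▸ this).2
        -- the filter over ys agrees for mem and the tail membership
        have hys_filter : (ys.filter (fun z => !(decide ((z - 1) ∈ ((x + 1) :: ys))))) =
            (ys.filter (fun z => !mem (z - 1))) := by
          refine List.filter_congr ?_
          intro z hz
          rw [hagree (z - 1) (by have := hysgt z hz; omega)]
        -- the head expansion
        have hgap : ∃ k : Nat, k ≤ F₁ ∧
            (decide ((x + 1 + (k : Int)) ∈ ((x + 1) :: ys))) = false := by
          obtain ⟨k, hk, hkn⟩ := pvExists_gap ((x + 1) :: ys) (x + 1)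
          simp only [List.length_cons] at hk hF1
          exact ⟨k, by omega, by simpa using hkn⟩
        have hhead : pvExpand mem (F₁ + 1) x = x :: (x + 1) :: t := by
          obtain ⟨k, hkF, hkmem⟩ := hgap
          calc pvExpand mem (F₁ + 1) x = x :: pvExpand mem F₁ (x + 1) := by
                simp [pvExpand, hmx]
            _ = x :: pvExpand (fun z => decide (z ∈ (x + 1) :: ys)) F₁ (x + 1) := by
                rw [pvExpand_congr F₁ (x + 1) mem (fun z => decide (z ∈ (x + 1) :: ys))
                  (fun w hw => hagree w (by omega))]
            _ = x :: pvExpand (fun z => decide (z ∈ (x + 1) :: ys)) (F₁ + 1) (x + 1) := by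
                rw [pvExpand_stable k (fun z => decide (z ∈ (x + 1) :: ys)) (x + 1) F₁ (F₁ + 1)
                  hkmem hkF (by omega)]
            _ = x :: (x + 1) :: t := by rw [← heq1]
        -- the tail expansions agree for mem and the tail membership
        have htail : (ys.filter (fun z => !mem (z - 1))).map (pvExpand mem (F₁ + 1)) = rest := by
          rw [heq2, hys_filter]
          refine List.map_congr_left ?_
          intro z hz
          have hzys := List.mem_of_mem_filter hz
          exact pvExpand_congr (F₁ + 1) z mem (fun w => decide (w ∈ (x + 1) :: ys))
            (fun w hw => hagree w (by have := hysgt z hzys; omega))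
        rw [hLHS]
        have hpx1 : (!mem (x + 1 - 1)) = false := by
          simpa using hmx
        simp only [List.filter_cons, hpx, if_true, hpx1, Bool.false_eq_true, if_false, List.map]
        rw [hhead, htail]
    · -- the head run is the singleton [x]
      have hmx1 : mem (x + 1) = false := by
        have hno : (x + 1) ∉ (x :: xs) := by
          simp only [List.mem_cons, not_or]
          exact ⟨by omega, hx1⟩
        cases hmz : mem (x + 1)
        · rfl
        · exact absurd ((hmem _).1 hmz) hno
      have hhead : pvExpand mem (F₁ + 1) x = [x] := by
        simp [pvExpand, hmx, pvExpand_nil mem F₁ (x + 1) hmx1]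
      have hxs_filter : (xs.filter (fun z => !(decide ((z - 1) ∈ xs)))) =
          (xs.filter (fun z => !mem (z - 1))) := by
        refine List.filter_congr ?_
        intro z hz
        have hzx : x < z := hlt z hz
        have hzne : z ≠ x + 1 := fun h => hx1 (h ▸ hz)
        rw [hagree (z - 1) (by omega)]
      have htail : (xs.filter (fun z => !mem (z - 1))).map (pvExpand mem (F₁ + 1)) = pvR xs := by
        rw [ihx, hxs_filter]
        refine List.map_congr_left ?_
        intro z hz
        have hzxs := List.mem_of_mem_filter hz
        exact (pvExpand_congr (F₁ + 1) z mem (fun w => decide (w ∈ xs))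
          (fun w hw => hagree w (by have := hlt z hzxs; omega)))
      have hLHS : pvR (x :: xs) = [x] :: pvR xs := by
        show pvStepB x (pvR xs) = _
        cases xs with
        | nil => rfl
        | cons y ys =>
          obtain ⟨t, rest, hhd⟩ := pvR_head y ys
          have hyne : y ≠ x + 1 := fun h => hx1 (h ▸ List.mem_cons_self ..)
          rw [hhd]
          simp [pvStepB, hyne]
      rw [hLHS]
      simp only [List.filter_cons, hpx, if_true, List.map]
      rw [hhead, htail]

-- B's conditional-append loop is a filter after a map
lemma pvFoldIf (m : Int) (f : Int → List Int) : ∀ (l : List Int) (acc : List (List Int)),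
    l.foldl (fun groups start =>
        if ((f start).length : Int) ≥ m then groups ++ [f start] else groups) acc =
      acc ++ (l.map f).filter (fun r => decide ((r.length : Int) ≥ m)) := by
  intro l
  induction l with
  | nil => intro acc; simp
  | cons z l ih =>
    intro acc
    simp only [List.foldl, List.map, List.filter]
    by_cases hz : ((f z).length : Int) ≥ m
    · simp [hz, ih]
    · simp [hz, ih]

-- ===== VERDICT (by name: the statement is the Claim_ definition above) =====
theorem find_mistimed_groups_spec : Claim_equal_find_mistimed_groups := by
  intro ml m _ hpre
  unfold Spec_find_mistimed_groups
  have hofl : PySem.Set.ofList ml = ml := PySem.Set.ofList_eq_self_of_nodup ml hpre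
  have hB : find_mistimed_groups_alt ml m =
      (PySem.List.sorted (ml.filter (fun x => !(PySem.Set.contains ml (x - 1)))) (fun x => x)).foldl
        (fun groups start =>
          if ((pvExpand (fun z => PySem.Set.contains ml z) ml.length start).length : Int) ≥ m
          then groups ++ [pvExpand (fun z => PySem.Set.contains ml z) ml.length start]
          else groups) [] := by
    unfold find_mistimed_groups_alt
    rw [hofl]
  set mem : Int → Bool := fun z => PySem.Set.contains ml z with hmemdef
  set L : List Int := PySem.List.sorted ml (fun x => x) with hLdef
  have hperm : L.Perm ml := PySem.List.sorted_perm ml (fun x => x) false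
  have hndL : L.Nodup := (hperm.nodup_iff).mpr hpre
  have hpwlt : L.Pairwise (· < ·) := by
    have h1 : L.Pairwise (· ≤ ·) := PySem.List.sorted_pairwise ml (fun x => x)
    have h2 : L.Pairwise (· ≠ ·) := hndL
    exact (h1.and h2).imp (fun h => lt_of_le_of_ne h.1 h.2)
  have hstarts : PySem.List.sorted (ml.filter (fun x => !(PySem.Set.contains ml (x - 1)))) (fun x => x) =
      L.filter (fun x => !mem (x - 1)) := by
    refine PySem.List.sorted_eq_of_perm_of_pairwise_lt _ _ _ ?_ ?_
    · exact hperm.filter _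
    · exact hpwlt.filter _
  have hmemchar : ∀ z, mem z = true ↔ z ∈ L := by
    intro z
    rw [hmemdef]
    constructor
    · intro h
      exact hperm.mem_iff.mpr ((PySem.Set.contains_iff ml z).mp h)
    · intro h
      exact (PySem.Set.contains_iff ml z).mpr (hperm.mem_iff.mp h)
  have hlen : L.length ≤ ml.length := le_of_eq (hperm.length_eq)
  rw [hB, hstarts, pvFoldIf m (pvExpand mem ml.length) (L.filter (fun x => !mem (x - 1))) [],
      List.nil_append, ← pvR_runs L hpwlt mem ml.length hmemchar hlen, pvA_char]
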